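-- pv_equiv track=rewrite | github.com/satemochi/saaaaah | geometric_misc/huffman_code/canonical_huffman_code.py | decode_codebook
-- ===== SOURCE A (Python) =====
-- def decode_codebook(bit_lens, alphabet):
--     al, codebook, cval = list(alphabet)[::-1], {}, 0
--     for i, bl in enumerate(bit_lens, 1):
--         cval <<= 1
--         for j in range(bl):
--             codebook[al.pop()] = str(bin(cval)[2:]).zfill(i)
--             cval += 1
--     return codebook
-- ===== SOURCE B (Python) =====
-- def decode_codebook(bit_lens, alphabet):
--     # Non-mutating decomposition: per length-class, a slice of the alphabet is
--     # paired with arithmetically computed codes (start + offset); the dict is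
--     # built once at the end from the flat pair list.
--     pairs, code, idx = [], 0, 0
--     for i, bl in enumerate(bit_lens, 1):
--         code <<= 1
--         n = max(bl, 0)
--         syms = alphabet[idx: idx + n]
--         pairs.extend((s, bin(code + j)[2:].zfill(i)) for j, s in enumerate(syms))
--         code += n
--         idx += n
--     return dict(pairs)
-- ===== Notes on version B (the rewrite author's own statement) =====
-- stated objective: alternative
-- what changed: B replaces A's mutating scheme (reversed alphabet popped symbol-by-symbol while a counter is incremented inside nested loops, dict filled as it goes) by a non-mutating decomposition: per bit-length it slices the alphabet and computes each code arithmetically as start+offset, collects a flat pair list, and builds the dict once at the end.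
import Mathlib
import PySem

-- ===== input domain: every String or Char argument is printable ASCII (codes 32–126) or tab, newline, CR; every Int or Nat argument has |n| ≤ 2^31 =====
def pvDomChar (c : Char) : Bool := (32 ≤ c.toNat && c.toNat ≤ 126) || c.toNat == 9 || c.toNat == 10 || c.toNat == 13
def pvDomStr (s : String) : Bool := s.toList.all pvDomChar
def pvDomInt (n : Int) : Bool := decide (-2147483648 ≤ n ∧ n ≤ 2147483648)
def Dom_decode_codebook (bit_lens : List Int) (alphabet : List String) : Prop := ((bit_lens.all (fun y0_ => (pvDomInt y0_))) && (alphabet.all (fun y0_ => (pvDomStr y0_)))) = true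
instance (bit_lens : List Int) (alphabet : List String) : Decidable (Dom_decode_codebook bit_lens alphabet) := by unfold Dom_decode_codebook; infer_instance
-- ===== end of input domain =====

-- B builds the codebook from alphabet slices and arithmetic codes instead of popping a
-- reversed copy while mutating a counter; equivalence on all inputs where A raises no IndexError.

-- ===== PORT A =====
-- str(bin(cval)[2:]).zfill(i): cval is ≥ 0 throughout, so bin(cval)[2:] = format(cval,'b') = toBin
def pvFmtA (c : Int) (i : Int) : String := PySem.Str.zfill (PySem.Int.toBin c) i

-- inner loop body: codebook[al.pop()] = …; cval += 1  (pop on empty list raises in Python: outside Pre_)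
def pvAInner (i : Int) (st : List String × PySem.Dict String String × Int) (_j : Int) :
    List String × PySem.Dict String String × Int :=
  match PySem.List.pop? st.1 with
  | none => (st.1, st.2.1, st.2.2 + 1)
  | some (x, al') => (al', st.2.1.insert x (pvFmtA st.2.2 i), st.2.2 + 1)

-- outer loop body: cval <<= 1 (= *2); for j in range(bl): …
def pvAStep (st : List String × PySem.Dict String String × Int) (p : Int × Int) :
    List String × PySem.Dict String String × Int :=
  (PySem.List.pyRange 0 p.2 1).foldl (pvAInner p.1) (st.1, st.2.1, st.2.2 * 2)

def decode_codebook (bit_lens : List Int) (alphabet : List String) : List (String × String) :=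
  let al := (PySem.List.slice? alphabet none none (-1)).getD []   -- list(alphabet)[::-1]
  (((PySem.List.enumerate bit_lens 1).foldl pvAStep (al, PySem.Dict.empty, 0)).2.1).items

-- ===== PORT B =====
-- one length-class: the slice's symbols paired with codes start+offset
def pvBPairsOf (i : Int) (c : Int) (syms : List String) : List (String × String) :=
  (PySem.List.enumerate syms 0).map (fun p => (p.2, PySem.Str.zfill (PySem.Int.toBin (c + p.1)) i))

def pvBStep (alphabet : List String)
    (st : List (String × String) × Int × Int) (p : Int × Int) :
    List (String × String) × Int × Int :=
  let c := st.2.1 * 2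
  let n := max p.2 0
  let syms := PySem.List.slice alphabet (some st.2.2) (some (st.2.2 + n))
  (st.1 ++ pvBPairsOf p.1 c syms, c + n, st.2.2 + n)

def decode_codebook_alt (bit_lens : List Int) (alphabet : List String) : List (String × String) :=
  (PySem.Dict.ofList
    ((PySem.List.enumerate bit_lens 1).foldl (pvBStep alphabet) ([], 0, 0)).1).items

-- ===== PRECONDITION & SPEC =====
-- Pre_ excludes exactly the inputs on which A raises IndexError: the alphabet is shorter
-- than the total number of codewords demanded by bit_lens (negative entries demand none).
def Pre_decode_codebook (bit_lens : List Int) (alphabet : List String) : Prop :=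
  (bit_lens.map (fun b => max b 0)).sum ≤ (alphabet.length : Int)
instance (bit_lens : List Int) (alphabet : List String) : Decidable (Pre_decode_codebook bit_lens alphabet) := by unfold Pre_decode_codebook; infer_instance

def pvWitness_decode_codebook : List Int × List String := ([2, 1], ["a", "b", "c"])

def Spec_decode_codebook (bit_lens : List Int) (alphabet : List String) (out : List (String × String)) : Prop := out = decode_codebook_alt bit_lens alphabet
instance (bit_lens : List Int) (alphabet : List String) (out : List (String × String)) : Decidable (Spec_decode_codebook bit_lens alphabet out) := by unfold Spec_decode_codebook; infer_instance

-- ===== CLAIM (what is proved, stated in full; the proofs are below) =====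
def Claim_equal_decode_codebook : Prop := ∀ (bit_lens : List Int) (alphabet : List String), Dom_decode_codebook bit_lens alphabet → Pre_decode_codebook bit_lens alphabet → Spec_decode_codebook bit_lens alphabet (decode_codebook bit_lens alphabet)

-- ===== LEMMAS AND PROOFS =====

-- total demand, as a Nat
def pvDem (bls : List Int) : Nat := (bls.map Int.toNat).sum

-- the reference pair sequence both sides produce
def pvPairs : List Int → Int → Int → List String → List (String × String)
  | [], _, _, _ => []
  | bl :: bls, i, c, rest =>
      let c' := c * 2
      let n := bl.toNat
      pvBPairsOf i c' (rest.take n) ++ pvPairs bls (i + 1) (c' + n) (rest.drop n)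

-- final cval
def pvCFin : List Int → Int → Int
  | [], c => c
  | bl :: bls, c => pvCFin bls (c * 2 + bl.toNat)

theorem pvEnumMapShift {β : Type} (l : List String) (s : Int) (f : Int → String → β) :
    (PySem.List.enumerate l (s + 1)).map (fun p => f p.1 p.2)
      = (PySem.List.enumerate l s).map (fun p => f (p.1 + 1) p.2) := by
  induction l generalizing s with
  | nil => simp [PySem.List.enumerate]
  | cons x xs ih => simp [PySem.List.enumerate_cons, ih]

theorem pvBPairsOf_cons (i c : Int) (x : String) (l : List String) :
    pvBPairsOf i c (x :: l) = (x, pvFmtA c i) :: pvBPairsOf i (c + 1) l := by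
  simp only [pvBPairsOf, PySem.List.enumerate_cons, List.map_cons, pvFmtA, add_zero]
  rw [show (0 : Int) + 1 = 0 + 1 by rfl,
    pvEnumMapShift l 0 (fun j s => (s, PySem.Str.zfill (PySem.Int.toBin (c + j)) i))]
  congr 1
  apply List.map_congr_left
  intro p _
  have : c + (p.1 + 1) = c + 1 + p.1 := by ring
  rw [this]

def pvIns (d : PySem.Dict String String) (p : String × String) : PySem.Dict String String :=
  d.insert p.1 p.2

-- n iterations of the inner body (the loop ignores its range variable)
def pvIterA (i : Int) : Nat → (List String × PySem.Dict String String × Int) →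
    (List String × PySem.Dict String String × Int)
  | 0, st => st
  | n + 1, st => pvIterA i n (pvAInner i st 0)

theorem pvFoldlIgnore (i : Int) (l : List Int) (st : List String × PySem.Dict String String × Int) :
    l.foldl (pvAInner i) st = pvIterA i l.length st := by
  induction l generalizing st with
  | nil => rfl
  | cons x xs ih =>
      simp only [List.foldl_cons, List.length_cons, pvIterA]
      rw [ih]
      rfl

theorem pvIterA_spec (i : Int) : ∀ (n : Nat) (rest : List String)
    (d : PySem.Dict String String) (c : Int), n ≤ rest.length →
    pvIterA i n (rest.reverse, d, c)
      = ((rest.drop n).reverse, (pvBPairsOf i c (rest.take n)).foldl pvIns d, c + n) := by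
  intro n
  induction n with
  | zero => intro rest d c _; simp [pvIterA, pvBPairsOf]
  | succ m ih =>
      intro rest d c h
      match rest with
      | [] => simp at h
      | x :: rest' =>
          have hpop : PySem.List.pop? ((x :: rest').reverse) = some (x, rest'.reverse) := by
            rw [List.reverse_cons]; exact PySem.List.pop?_last _ _
          simp only [pvIterA, pvAInner, hpop]
          have hm : m ≤ rest'.length := by simpa using h
          rw [ih rest' (d.insert x (pvFmtA c i)) (c + 1) hm]
          simp only [List.drop_succ_cons, List.take_succ_cons, pvBPairsOf_cons, List.foldl_cons,
            Prod.mk.injEq]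
          refine ⟨?_, ?_, ?_⟩ <;> first | trivial | (push_cast; ring)

theorem pvOuterA (bls : List Int) : ∀ (i c : Int) (rest : List String)
    (d : PySem.Dict String String), pvDem bls ≤ rest.length →
    (PySem.List.enumerate bls i).foldl pvAStep (rest.reverse, d, c)
      = ((rest.drop (pvDem bls)).reverse, (pvPairs bls i c rest).foldl pvIns d, pvCFin bls c) := by
  induction bls with
  | nil => intro i c rest d _; simp [PySem.List.enumerate, pvDem, pvPairs, pvCFin]
  | cons bl bls ih =>
      intro i c rest d h
      have hdem : pvDem (bl :: bls) = bl.toNat + pvDem bls := by simp [pvDem]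
      have hn : bl.toNat ≤ rest.length := by omega
      rw [PySem.List.enumerate_cons, List.foldl_cons]
      have hstep : pvAStep (rest.reverse, d, c) (i, bl)
          = ((rest.drop bl.toNat).reverse,
             (pvBPairsOf i (c * 2) (rest.take bl.toNat)).foldl pvIns d,
             c * 2 + bl.toNat) := by
        simp only [pvAStep]
        rw [pvFoldlIgnore, PySem.List.length_pyRange_one]
        have : (bl - 0).toNat = bl.toNat := by omega
        rw [this, pvIterA_spec i bl.toNat rest d (c * 2) hn]
      rw [hstep, ih (i + 1) (c * 2 + bl.toNat) (rest.drop bl.toNat) _ (by simp; omega)]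
      simp only [pvPairs, pvCFin, List.drop_drop, List.foldl_append]
      rw [hdem]

theorem pvOuterB (alphabet : List String) (bls : List Int) : ∀ (i c : Int) (k : Nat)
    (ps : List (String × String)),
    (PySem.List.enumerate bls i).foldl (pvBStep alphabet) (ps, c, (k : Int))
      = (ps ++ pvPairs bls i c (alphabet.drop k), pvCFin bls c, ((k + pvDem bls : Nat) : Int)) := by
  induction bls with
  | nil => intro i c k ps; simp [PySem.List.enumerate, pvPairs, pvCFin, pvDem]
  | cons bl bls ih =>
      intro i c k ps
      rw [PySem.List.enumerate_cons, List.foldl_cons]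
      have hmax : max bl 0 = (bl.toNat : Int) := by omega
      have hslice : PySem.List.slice alphabet (some (k : Int)) (some ((k : Int) + (bl.toNat : Int)))
          = (alphabet.drop k).take bl.toNat := PySem.List.slice_natCast_add alphabet k bl.toNat
      have hstep : pvBStep alphabet (ps, c, (k : Int)) (i, bl)
          = (ps ++ pvBPairsOf i (c * 2) ((alphabet.drop k).take bl.toNat),
             c * 2 + (bl.toNat : Int), ((k + bl.toNat : Nat) : Int)) := by
        simp only [pvBStep, hmax, hslice, Prod.mk.injEq]
        exact ⟨trivial, trivial, by push_cast; ring⟩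
      rw [hstep,
        ih (i + 1) (c * 2 + (bl.toNat : Int)) (k + bl.toNat) _]
      simp only [pvPairs, pvCFin, pvDem, List.map_cons, List.sum_cons, List.append_assoc,
        List.drop_drop, Prod.mk.injEq]
      refine ⟨?_, ?_, ?_⟩ <;> first | trivial | (push_cast; ring)

theorem pvPreDem (bls : List Int) (al : List String) (h : Pre_decode_codebook bls al) :
    pvDem bls ≤ al.length := by
  unfold Pre_decode_codebook at h
  induction bls generalizing al with
  | nil => simp [pvDem]
  | cons b bs ih =>
      simp only [List.map_cons, List.sum_cons] at h
      simp only [pvDem, List.map_cons, List.sum_cons]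
      have hb : ((b.toNat : Int) + ((bs.map Int.toNat).sum : Int)) ≤ (al.length : Int) := by
        have hs : ((bs.map (fun x => max x 0)).sum) = (((bs.map Int.toNat).sum : Nat) : Int) := by
          clear h ih
          induction bs with
          | nil => simp
          | cons x xs ihx => simp only [List.map_cons, List.sum_cons, ihx]; push_cast; omega
        rw [hs] at h; omega
      have := hb
      push_cast at this
      omega

-- ===== VERDICT (by name: the statement is the Claim_ definition above) =====
theorem decode_codebook_spec : Claim_equal_decode_codebook := by
  intro bls al _ hpre
  unfold Spec_decode_codebook decode_codebook decode_codebook_alt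
  rw [PySem.List.slice?_none_none_neg_one]
  simp only [Option.getD_some]
  rw [pvOuterA bls 1 0 al PySem.Dict.empty (pvPreDem bls al hpre)]
  have h0 : (([] : List (String × String)), (0 : Int), (0 : Int))
      = ([], (0 : Int), ((0 : Nat) : Int)) := by norm_num
  rw [h0, pvOuterB al bls 1 0 0 []]
  simp only [List.drop_zero, List.nil_append]
  rfl
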